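-- pv_equiv track=rewrite | github.com/Prorise-cool/Prorise_ai_teach_workspace | packages/fastapi-backend/tests/unit/classroom/test_routes_chat.py | _parse_sse_frames
-- ===== SOURCE A (Python) =====
-- def _parse_sse_frames(body: str) -> list[dict[str, str]]:
--     """解析 SSE 帧：返回每帧的 event / data 字段（data 保持原始字符串）。"""
--     frames: list[dict[str, str]] = []
--     for raw in body.split("\n\n"):
--         raw = raw.strip("\n")
--         if not raw:
--             continue
--         frame = {"event": "", "data": ""}
--         for line in raw.split("\n"):
--             if line.startswith("event: "):
--                 frame["event"] = line[7:]
--             elif line.startswith("data: "):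
--                 frame["data"] = line[6:]
--         frames.append(frame)
--     return frames
-- ===== SOURCE B (Python) =====
-- def _parse_sse_frames(body: str) -> list[dict[str, str]]:
--     """One-pass line scanner: keep a current (event, data) pair and a 'started' flag;
--     flush on a blank line, and once more at the end if a frame is open."""
--     frames: list[dict[str, str]] = []
--     event = ""
--     data = ""
--     started = False
--     for line in body.split("\n"):
--         if line.startswith("event: "):
--             event = line[7:]
--             started = True
--         elif line.startswith("data: "):
--             data = line[6:]
--             started = True
--         elif line == "":
--             if started:
--                 frames.append({"event": event, "data": data})
--                 event = ""
--                 data = ""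
--                 started = False
--         else:
--             started = True
--     if started:
--         frames.append({"event": event, "data": data})
--     return frames
-- ===== Notes on version B (the rewrite author's own statement) =====
-- stated objective: alternative
-- what changed: Replaced the two-level split (split on '\n\n', strip, re-split each chunk on '\n') by a single pass over body.split('\n') that keeps a current event/data pair and a 'started' flag, flushing a frame on each blank line and once at the end.
import Mathlib
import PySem

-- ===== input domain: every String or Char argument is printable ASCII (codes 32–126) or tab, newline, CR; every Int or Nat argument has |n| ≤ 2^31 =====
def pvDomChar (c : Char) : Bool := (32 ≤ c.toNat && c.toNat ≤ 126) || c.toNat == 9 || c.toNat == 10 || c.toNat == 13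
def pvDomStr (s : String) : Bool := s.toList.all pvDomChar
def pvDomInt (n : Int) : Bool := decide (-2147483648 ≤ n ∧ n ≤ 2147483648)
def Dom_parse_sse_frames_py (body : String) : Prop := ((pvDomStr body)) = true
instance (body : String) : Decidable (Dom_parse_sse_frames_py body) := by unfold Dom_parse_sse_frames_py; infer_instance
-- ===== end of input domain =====

-- B replaces A's two-level split (split on "\n\n", strip, re-split each chunk on "\n") by a
-- single pass over body.split("\n") with a current event/data pair and a 'started' flag
-- (alternative decomposition, same asymptotic cost).

-- ===== PORT A =====
-- body of A's inner `for line in raw.split("\n")` loop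
def pv_a_inner (frame : PySem.Dict String String) (line : String) : PySem.Dict String String :=
  if PySem.Str.startswith line "event: " then
    frame.insert "event" (PySem.Str.slice line (some 7) none)
  else if PySem.Str.startswith line "data: " then
    frame.insert "data" (PySem.Str.slice line (some 6) none)
  else frame

-- body of A's outer `for raw in body.split("\n\n")` loop
def pv_a_step (frames : List (List (String × String))) (raw0 : String) :
    List (List (String × String)) :=
  let raw := PySem.Str.stripChars raw0 "\n"
  if raw = "" then frames
  else
    frames ++
      [(((PySem.Str.split? raw "\n").getD []).foldl pv_a_inner
          (PySem.Dict.mk [("event", ""), ("data", "")])).items]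

def parse_sse_frames_py (body : String) : List (List (String × String)) :=
  ((PySem.Str.split? body "\n\n").getD []).foldl pv_a_step []

-- ===== PORT B =====
-- body of B's single `for line in body.split("\n")` loop; state = (frames, event, data, started)
def pv_b_step (st : List (List (String × String)) × String × String × Bool) (line : String) :
    List (List (String × String)) × String × String × Bool :=
  if PySem.Str.startswith line "event: " then
    (st.1, PySem.Str.slice line (some 7) none, st.2.2.1, true)
  else if PySem.Str.startswith line "data: " then
    (st.1, st.2.1, PySem.Str.slice line (some 6) none, true)
  else if line = "" then
    (if st.2.2.2 then (st.1 ++ [[("event", st.2.1), ("data", st.2.2.1)]], "", "", false)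
     else st)
  else (st.1, st.2.1, st.2.2.1, true)

-- B's trailing `if started: frames.append(...)` flush
def pv_b_finish (r : List (List (String × String)) × String × String × Bool) :
    List (List (String × String)) :=
  if r.2.2.2 then r.1 ++ [[("event", r.2.1), ("data", r.2.2.1)]] else r.1

def parse_sse_frames_py_alt (body : String) : List (List (String × String)) :=
  pv_b_finish (((PySem.Str.split? body "\n").getD []).foldl pv_b_step ([], "", "", false))

-- ===== PRECONDITION & SPEC =====
def Spec_parse_sse_frames_py (body : String) (out : List (List (String × String))) : Prop := out = parse_sse_frames_py_alt body
instance (body : String) (out : List (List (String × String))) : Decidable (Spec_parse_sse_frames_py body out) := by unfold Spec_parse_sse_frames_py; infer_instance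

-- ===== CLAIM (what is proved, stated in full; the proofs are below) =====
def Claim_equal_parse_sse_frames_py : Prop := ∀ (body : String), Dom_parse_sse_frames_py body → Spec_parse_sse_frames_py body (parse_sse_frames_py body)

-- ===== LEMMAS AND PROOFS =====

-- clean recursive characterisations of split on "\n" (lines) and on "\n\n" (chunks)
def pvLines : List Char → List (List Char)
  | [] => [[]]
  | c :: rest => if c = '\n' then [] :: pvLines rest else (pvLines rest).modifyHead (c :: ·)

def pvChunks : List Char → List (List Char)
  | [] => [[]]
  | c :: rest =>
    if c = '\n' ∧ rest.head? = some '\n' then [] :: pvChunks rest.tail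
    else (pvChunks rest).modifyHead (c :: ·)
  termination_by l => l.length
  decreasing_by
  all_goals (simp; try omega)

-- fuelled split mirroring PySem.Chars.splitOn.go
def pvSpF (sep : List Char) : Nat → List Char → List (List Char)
  | 0, l => [l]
  | _+1, [] => [[]]
  | fuel+1, c :: rest =>
      if sep.isPrefixOf (c :: rest) then [] :: pvSpF sep fuel ((c :: rest).drop sep.length)
      else (pvSpF sep fuel rest).modifyHead (c :: ·)

-- "no two consecutive newlines" invariant of chunks
def pvNoNN : List Char → Bool
  | [] => true
  | c :: rest => if c = '\n' ∧ rest.head? = some '\n' then false else pvNoNN rest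

def pvGlue : List (List Char) → List (List Char)
  | [] => []
  | [c] => pvLines c
  | c :: cs => pvLines c ++ [] :: pvGlue cs

def pvEv : List Char := "event: ".toList
def pvDa : List Char := "data: ".toList

def pvFrame (e d : List Char) : List (String × String) :=
  [("event", String.ofList e), ("data", String.ofList d)]

def pvPairStep (p : List Char × List Char) (l : List Char) : List Char × List Char :=
  if PySem.Chars.startswith l pvEv then (l.drop 7, p.2)
  else if PySem.Chars.startswith l pvDa then (p.1, l.drop 6)
  else p

def pvStrip (c : List Char) : List Char := PySem.Chars.stripChars c ['\n']

def pvChunkPair (c : List Char) : List Char × List Char := (pvLines c).foldl pvPairStep ([], [])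

def pvF (c : List Char) : List (List (String × String)) :=
  if pvStrip c = [] then []
  else [pvFrame (pvChunkPair (pvStrip c)).1 (pvChunkPair (pvStrip c)).2]

def pvAstep (acc : List (List (String × String))) (c : List Char) : List (List (String × String)) :=
  acc ++ pvF c

abbrev PvSt := List (List (String × String)) × List Char × List Char × Bool

def pvBstep (st : PvSt) (l : List Char) : PvSt :=
  if PySem.Chars.startswith l pvEv then (st.1, l.drop 7, st.2.2.1, true)
  else if PySem.Chars.startswith l pvDa then (st.1, st.2.1, l.drop 6, true)
  else if l = [] then (if st.2.2.2 then (st.1 ++ [pvFrame st.2.1 st.2.2.1], [], [], false) else st)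
  else (st.1, st.2.1, st.2.2.1, true)

def pvBfin (st : PvSt) : List (List (String × String)) :=
  if st.2.2.2 then st.1 ++ [pvFrame st.2.1 st.2.2.1] else st.1

-- ---- split bridge ----
theorem pv_modifyHead_comp {α : Type} (f g : α → α) (l : List α) :
    (l.modifyHead g).modifyHead f = l.modifyHead (fun x => f (g x)) := by
  cases l <;> simp

theorem pv_modifyHead_append {α : Type} (f : α → α) (l l' : List α) (h : l ≠ []) :
    (l ++ l').modifyHead f = l.modifyHead f ++ l' := by
  cases l with
  | nil => exact absurd rfl h
  | cons a t => simp

theorem pvLines_cons_nl (rest : List Char) : pvLines ('\n' :: rest) = [] :: pvLines rest := by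
  simp [pvLines]

theorem pvLines_cons (c : Char) (rest : List Char) (hc : c ≠ '\n') :
    pvLines (c :: rest) = (pvLines rest).modifyHead (c :: ·) := by
  simp [pvLines, hc]

theorem pv_modifyHead_idfun {α : Type} (l : List α) :
    List.modifyHead (fun x : α => x) l = l := by
  cases l <;> simp

theorem pv_go_eq (sep : List Char) (fuel : Nat) :
    ∀ (l cur : List Char) (acc : List (List Char)),
    PySem.Chars.splitOn.go sep fuel l cur acc
      = acc.reverse ++ (pvSpF sep fuel l).modifyHead (cur.reverse ++ ·) := by
  induction fuel with
  | zero => intro l cur acc; simp [PySem.Chars.splitOn.go, pvSpF]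
  | succ n ih =>
    intro l cur acc
    cases l with
    | nil => simp [PySem.Chars.splitOn.go, pvSpF]
    | cons c rest =>
      rw [PySem.Chars.splitOn.go]
      by_cases h : sep.isPrefixOf (c :: rest)
      · simp only [h, if_true, ih, pvSpF]
        simp [pv_modifyHead_idfun]
      · simp only [h, ih, pvSpF, Bool.false_eq_true, if_false, pv_modifyHead_comp]
        simp

theorem pv_splitOn_eq_spF (s sep : List Char) :
    PySem.Chars.splitOn s sep = pvSpF sep (s.length + 1) s := by
  show PySem.Chars.splitOn.go sep (s.length + 1) s [] [] = _
  rw [pv_go_eq]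
  simp [pv_modifyHead_idfun]

theorem pv_spF_lines (fuel : Nat) : ∀ l : List Char, l.length < fuel →
    pvSpF ['\n'] fuel l = pvLines l := by
  induction fuel with
  | zero => intro l h; omega
  | succ n ih =>
    intro l h
    cases l with
    | nil => simp [pvSpF, pvLines]
    | cons c rest =>
      simp only [pvSpF, pvLines]
      by_cases hc : c = '\n'
      · subst hc
        rw [if_pos (by simp [List.isPrefixOf]), if_pos rfl]
        simp only [List.length_cons] at h
        simp [ih rest (by omega)]
      · rw [if_neg (by simp [List.isPrefixOf]; exact fun hh => hc hh.symm), if_neg hc]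
        simp only [List.length_cons] at h
        rw [ih rest (by omega)]

theorem pv_spF_chunks (fuel : Nat) : ∀ l : List Char, l.length < fuel →
    pvSpF ['\n', '\n'] fuel l = pvChunks l := by
  induction fuel with
  | zero => intro l h; omega
  | succ n ih =>
    intro l h
    cases l with
    | nil => simp [pvSpF, pvChunks]
    | cons c rest =>
      rw [pvSpF, pvChunks]
      by_cases hcr : c = '\n' ∧ rest.head? = some '\n'
      · obtain ⟨hc, hr⟩ := hcr
        subst hc
        cases rest with
        | nil => simp at hr
        | cons r2 rt =>
          simp only [List.head?_cons, Option.some.injEq] at hr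
          subst hr
          rw [if_pos (by simp [List.isPrefixOf]), if_pos (by simp)]
          simp only [List.length_cons] at h
          simp [ih rt (by omega)]
      · have hpf : (['\n', '\n'] : List Char).isPrefixOf (c :: rest) = false := by
          cases rest with
          | nil => simp [List.isPrefixOf]
          | cons r2 rt =>
            simp only [List.isPrefixOf, Bool.and_eq_false_iff]
            by_cases hc : c = '\n'
            · subst hc
              have hr2 : r2 ≠ '\n' := by
                intro hr2; exact hcr ⟨rfl, by simp [hr2]⟩
              exact Or.inr (by simp [List.isPrefixOf]; exact fun hh => hr2 hh.symm)
            · exact Or.inl (by simp; exact fun hh => hc hh.symm)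
        rw [if_neg (by simp [hpf]), if_neg hcr]
        simp only [List.length_cons] at h
        rw [ih rest (by omega)]

theorem pv_lines_ne_nil (l : List Char) : pvLines l ≠ [] := by
  induction l with
  | nil => simp [pvLines]
  | cons c rest ih =>
    simp only [pvLines]
    split
    · simp
    · intro h
      cases hL : pvLines rest with
      | nil => exact ih hL
      | cons q qs => rw [hL] at h; simp at h

theorem pv_chunks_ne_nil (l : List Char) : pvChunks l ≠ [] := by
  induction l using pvChunks.induct with
  | case1 => simp [pvChunks]
  | case2 c rest h ih => rw [pvChunks, if_pos h]; simp
  | case3 c rest h ih =>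
    rw [pvChunks, if_neg h]
    intro hc
    cases hL : pvChunks rest with
    | nil => exact ih hL
    | cons q qs => rw [hL] at hc; simp at hc

-- ---- glue: lines of s = lines of each chunk, joined with one empty line ----
theorem pv_glue_cons_cons (c : List Char) (q : List Char) (qs : List (List Char)) :
    pvGlue (c :: q :: qs) = pvLines c ++ [] :: pvGlue (q :: qs) := by
  rfl

theorem pv_lines_eq_glue (l : List Char) : pvLines l = pvGlue (pvChunks l) := by
  induction l using pvChunks.induct with
  | case1 => simp only [pvChunks]; rfl
  | case2 c rest h ih =>
    obtain ⟨hc, hr⟩ := h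
    subst hc
    cases rest with
    | nil => simp at hr
    | cons r2 rt =>
      simp only [List.head?_cons, Option.some.injEq] at hr
      subst hr
      rw [pvChunks, if_pos ⟨rfl, by simp⟩]
      simp only [List.tail_cons] at ih ⊢
      cases hC : pvChunks rt with
      | nil => exact absurd hC (pv_chunks_ne_nil rt)
      | cons q qs =>
        rw [hC] at ih
        rw [pv_glue_cons_cons]
        show [] :: pvLines ('\n' :: rt) = _
        show [] :: [] :: pvLines rt = _
        rw [ih]
        rfl
  | case3 c rest h ih =>
    rw [pvChunks, if_neg h]
    cases hC : pvChunks rest with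
    | nil => exact absurd hC (pv_chunks_ne_nil rest)
    | cons q qs =>
      rw [hC] at ih
      by_cases hc : c = '\n'
      · subst hc
        show [] :: pvLines rest = _
        rw [ih]
        cases qs with
        | nil =>
          show [] :: pvLines q = pvGlue [('\n' :: q)]
          show [] :: pvLines q = pvLines ('\n' :: q)
          simp [pvLines]
        | cons q2 qs2 =>
          rw [List.modifyHead_cons, pv_glue_cons_cons, pv_glue_cons_cons]
          show _ = pvLines ('\n' :: q) ++ _
          simp [pvLines]
      · rw [pvLines_cons _ _ hc, ih]
        cases qs with
        | nil =>
          show _ = pvLines (c :: q)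
          simp only [pvGlue, List.modifyHead_cons]
          simp [pvLines, hc]
        | cons q2 qs2 =>
          rw [List.modifyHead_cons, pv_glue_cons_cons, pv_glue_cons_cons]
          show (pvLines q ++ [] :: pvGlue (q2 :: qs2)).modifyHead (c :: ·) = pvLines (c :: q) ++ [] :: pvGlue (q2 :: qs2)
          rw [pv_modifyHead_append _ _ _ (pv_lines_ne_nil q)]
          simp [pvLines, hc]

-- ---- chunk invariant ----
theorem pv_chunks_head_prefix (l : List Char) : (pvChunks l).headI <+: l := by
  induction l using pvChunks.induct with
  | case1 => simp [pvChunks]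
  | case2 c rest h ih => rw [pvChunks, if_pos h]; simp
  | case3 c rest h ih =>
    rw [pvChunks, if_neg h]
    cases hC : pvChunks rest with
    | nil => exact absurd hC (pv_chunks_ne_nil rest)
    | cons q qs =>
      rw [hC] at ih
      simp only [List.modifyHead_cons, List.headI_cons] at ih ⊢
      exact List.cons_prefix_cons.mpr ⟨rfl, ih⟩

theorem pv_noNN_chunks (l : List Char) : ∀ c ∈ pvChunks l, pvNoNN c = true := by
  induction l using pvChunks.induct with
  | case1 => intro c hc; simp [pvChunks] at hc; subst hc; rfl
  | case2 c rest h ih =>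
    intro x hx
    rw [pvChunks, if_pos h] at hx
    rcases List.mem_cons.mp hx with hx | hx
    · subst hx; rfl
    · exact ih x hx
  | case3 c rest h ih =>
    intro x hx
    rw [pvChunks, if_neg h] at hx
    cases hC : pvChunks rest with
    | nil => exact absurd hC (pv_chunks_ne_nil rest)
    | cons q qs =>
      rw [hC] at hx
      simp only [List.modifyHead_cons] at hx
      rcases List.mem_cons.mp hx with hx | hx
      · subst hx
        rw [pvNoNN, if_neg]
        · exact ih q (by rw [hC]; exact List.mem_cons_self)
        · rintro ⟨hc, hq⟩
          subst hc
          apply h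
          refine ⟨rfl, ?_⟩
          have hpre : q <+: rest := by
            have := pv_chunks_head_prefix rest
            rwa [hC, List.headI_cons] at this
          obtain ⟨t, rfl⟩ := hpre
          cases q with
          | nil => simp at hq
          | cons a q' => simp only [List.head?_cons, Option.some.injEq] at hq; simp [hq]
      · exact ih x (by rw [hC]; exact List.mem_cons_of_mem q hx)

-- ---- strip lemmas ----
theorem pv_dropWhile_nl_of_head (c : List Char) (h1 : c.head? ≠ some '\n') :
    c.dropWhile (fun x => (['\n'] : List Char).contains x) = c := by
  cases c with
  | nil => rfl
  | cons a t =>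
    rw [List.dropWhile_cons, if_neg]
    simp only [List.head?_cons, ne_eq, Option.some.injEq] at h1
    simp [h1]

theorem pv_strip_id (c : List Char) (h1 : c.head? ≠ some '\n') (h2 : c.getLast? ≠ some '\n') :
    pvStrip c = c := by
  unfold pvStrip PySem.Chars.stripChars
  show (List.dropWhile (fun x => (['\n'] : List Char).contains x)
      (List.dropWhile (fun x => (['\n'] : List Char).contains x) c).reverse).reverse = c
  rw [pv_dropWhile_nl_of_head c h1, pv_dropWhile_nl_of_head, List.reverse_reverse]
  rw [List.head?_reverse]
  exact h2

theorem pv_strip_cons (c : List Char) : pvStrip ('\n' :: c) = pvStrip c := by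
  show (List.dropWhile (fun x => (['\n'] : List Char).contains x)
      (List.dropWhile (fun x => (['\n'] : List Char).contains x) ('\n' :: c)).reverse).reverse
      = pvStrip c
  rw [List.dropWhile_cons, if_pos (by simp)]
  rfl

theorem pv_strip_snoc (c : List Char) : pvStrip (c ++ ['\n']) = pvStrip c := by
  show (List.dropWhile (fun x => (['\n'] : List Char).contains x)
      (List.dropWhile (fun x => (['\n'] : List Char).contains x) (c ++ ['\n'])).reverse).reverse
      = pvStrip c
  rw [List.dropWhile_append]
  by_cases hd : (c.dropWhile (fun x => (['\n'] : List Char).contains x)).isEmpty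
  · rw [if_pos hd]
    rw [List.isEmpty_iff] at hd
    show _ = (List.dropWhile (fun x => (['\n'] : List Char).contains x)
      (List.dropWhile (fun x => (['\n'] : List Char).contains x) c).reverse).reverse
    rw [hd]
    simp [List.dropWhile]
  · rw [if_neg hd]
    rw [List.isEmpty_iff] at hd
    rw [List.reverse_append]
    simp only [List.reverse_cons, List.reverse_nil, List.nil_append, List.singleton_append]
    rw [List.dropWhile_cons, if_pos (by simp)]
    rfl

theorem pv_strip_ne (c : List Char) (h0 : c ≠ []) (h2 : c.getLast? ≠ some '\n') :
    pvStrip c ≠ [] := by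
  show (List.dropWhile (fun x => (['\n'] : List Char).contains x)
      (List.dropWhile (fun x => (['\n'] : List Char).contains x) c).reverse).reverse ≠ []
  intro hcon
  set p : Char → Bool := fun x => (['\n'] : List Char).contains x with hp
  by_cases hd : c.dropWhile p = []
  · rw [List.dropWhile_eq_nil_iff] at hd
    cases hgl : c.getLast? with
    | none => exact h0 (List.getLast?_eq_none_iff.mp hgl)
    | some a =>
      obtain ⟨l', hc'⟩ := List.getLast?_eq_some_iff.mp hgl
      have hpa := hd a (by rw [hc']; simp)
      rw [hp] at hpa
      simp only [List.contains_cons, List.contains_nil, Bool.or_false, beq_iff_eq] at hpa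
      exact h2 (by rw [hgl, hpa])
  · have hlast : (c.dropWhile p).getLast? = c.getLast? := by
      obtain ⟨t, ht⟩ := List.dropWhile_suffix p (l := c)
      conv_rhs => rw [← ht]
      exact (List.getLast?_append_of_ne_nil t hd).symm
    have hhead : (c.dropWhile p).reverse.head? = c.getLast? := by
      rw [List.head?_reverse]; exact hlast
    rw [List.reverse_eq_nil_iff] at hcon
    rw [pv_dropWhile_nl_of_head _ (by rw [hhead]; exact h2)] at hcon
    rw [List.reverse_eq_nil_iff] at hcon
    exact hd hcon

-- ---- lines lemmas ----
theorem pv_noNN_tail (c : Char) (rest : List Char) (h : pvNoNN (c :: rest) = true) :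
    pvNoNN rest = true := by
  rw [pvNoNN] at h
  split at h
  · exact absurd h (by simp)
  · exact h

theorem pv_noNN_snoc (c0 : List Char) (h : pvNoNN (c0 ++ ['\n']) = true) :
    pvNoNN c0 = true ∧ c0.getLast? ≠ some '\n' := by
  induction c0 with
  | nil => exact ⟨rfl, by simp⟩
  | cons x rt ih =>
    rw [List.cons_append, pvNoNN] at h
    split at h
    · exact absurd h (by simp)
    · rename_i hcond
      obtain ⟨h1, h2⟩ := ih h
      cases rt with
      | nil =>
        refine ⟨by rw [pvNoNN, if_neg (by simp)]; rfl, ?_⟩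
        simp only [List.nil_append, List.head?_cons] at hcond
        simp only [List.getLast?_singleton, ne_eq, Option.some.injEq]
        intro hx
        exact hcond (by simp [hx])
      | cons y rt2 =>
        constructor
        · rw [pvNoNN, if_neg]
          · exact h1
          · rintro ⟨hx, hy⟩
            exact hcond ⟨hx, by simpa using hy⟩
        · rw [List.getLast?_cons_cons]
          cases rt2 with
          | nil => simpa using h2
          | cons z rt3 => rw [List.getLast?_cons_cons]; rw [List.getLast?_cons_cons] at h2; simpa using h2

theorem pv_lines_snoc_nl (s : List Char) : pvLines (s ++ ['\n']) = pvLines s ++ [[]] := by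
  induction s with
  | nil => rfl
  | cons c rest ih =>
    by_cases hc : c = '\n'
    · subst hc
      rw [List.cons_append, pvLines_cons_nl, pvLines_cons_nl, ih]
      rfl
    · rw [List.cons_append, pvLines_cons _ _ hc, pvLines_cons _ _ hc, ih,
        pv_modifyHead_append _ _ _ (pv_lines_ne_nil rest)]

theorem pv_lines_all_ne_nil (n : Nat) : ∀ c : List Char, c.length = n → c ≠ [] →
    pvNoNN c = true → c.head? ≠ some '\n' → c.getLast? ≠ some '\n' →
    ∀ l ∈ pvLines c, l ≠ [] := by
  induction n using Nat.strong_induction_on with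
  | _ n ih =>
  intro c hlen h0 hn h1 h2 l hl
  cases c with
  | nil => exact absurd rfl h0
  | cons x rest =>
    have hx : x ≠ '\n' := by
      simp only [List.head?_cons, ne_eq, Option.some.injEq] at h1; exact h1
    rw [pvLines_cons _ _ hx] at hl
    cases rest with
    | nil =>
      simp only [pvLines, List.modifyHead] at hl
      simp only [List.mem_singleton] at hl
      subst hl; simp
    | cons y rt =>
      by_cases hy : y = '\n'
      · subst hy
        rw [pvLines_cons_nl, List.modifyHead_cons] at hl
        have hrt0 : rt ≠ [] := by
          intro hrt; subst hrt; simp at h2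
        rcases List.mem_cons.mp hl with hl | hl
        · subst hl; simp
        · have hn1 : pvNoNN ('\n' :: rt) = true := pv_noNN_tail _ _ hn
          have hrth : rt.head? ≠ some '\n' := by
            intro hhh
            rw [pvNoNN, if_pos ⟨rfl, hhh⟩] at hn1
            simp at hn1
          have hrtn : pvNoNN rt = true := pv_noNN_tail _ _ hn1
          have hrtl : rt.getLast? = (x :: '\n' :: rt).getLast? := by
            rw [List.getLast?_cons_cons]
            cases rt with
            | nil => exact absurd rfl hrt0
            | cons a b => rw [List.getLast?_cons_cons]
          have hlt : rt.length < n := by rw [← hlen]; simp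
          exact ih rt.length hlt rt rfl hrt0 hrtn hrth (by rw [hrtl]; exact h2) l hl
      · have hrn : pvNoNN (y :: rt) = true := pv_noNN_tail _ _ hn
        have hrh : (y :: rt).head? ≠ some '\n' := by simp [hy]
        have hrl : (y :: rt).getLast? = (x :: y :: rt).getLast? := (List.getLast?_cons_cons).symm
        have hlt : (y :: rt).length < n := by rw [← hlen]; simp
        cases hL : pvLines (y :: rt) with
        | nil => exact absurd hL (pv_lines_ne_nil _)
        | cons q qs =>
          rw [hL, List.modifyHead_cons] at hl
          rcases List.mem_cons.mp hl with hl | hl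
          · subst hl; simp
          · exact ih (y :: rt).length hlt (y :: rt) rfl (by simp) hrn hrh
              (by rw [hrl]; exact h2) l (by rw [hL]; exact List.mem_cons_of_mem q hl)

-- ---- noNN lemmas ----
-- ---- machine runs ----
theorem pv_sw_nil_ev : PySem.Chars.startswith [] pvEv = false := by decide

theorem pv_sw_nil_da : PySem.Chars.startswith [] pvDa = false := by decide

theorem pvBstep_nil_flush (acc : List (List (String × String))) (E D : List Char) :
    pvBstep (acc, E, D, true) [] = (acc ++ [pvFrame E D], [], [], false) := by
  simp [pvBstep, pv_sw_nil_ev, pv_sw_nil_da]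

theorem pvBstep_nil_idle (acc : List (List (String × String))) (E D : List Char) :
    pvBstep (acc, E, D, false) [] = (acc, E, D, false) := by
  simp [pvBstep, pv_sw_nil_ev, pv_sw_nil_da]

theorem pv_run_started (ls : List (List Char)) : ∀ (acc : List (List (String × String)))
    (e d : List Char), (∀ l ∈ ls, l ≠ []) →
    ls.foldl pvBstep (acc, e, d, true)
      = (acc, (ls.foldl pvPairStep (e, d)).1, (ls.foldl pvPairStep (e, d)).2, true) := by
  induction ls with
  | nil => intro acc e d _; simp
  | cons l t ih =>
    intro acc e d h
    have hl : l ≠ [] := h l List.mem_cons_self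
    have ht : ∀ x ∈ t, x ≠ [] := fun x hx => h x (List.mem_cons_of_mem _ hx)
    simp only [List.foldl_cons]
    by_cases h1 : PySem.Chars.startswith l pvEv
    · rw [show pvBstep (acc, e, d, true) l = (acc, l.drop 7, d, true) from by
          simp [pvBstep, h1],
        show pvPairStep (e, d) l = (l.drop 7, d) from by simp [pvPairStep, h1]]
      exact ih acc _ _ ht
    · by_cases h2 : PySem.Chars.startswith l pvDa
      · rw [show pvBstep (acc, e, d, true) l = (acc, e, l.drop 6, true) from by
            simp [pvBstep, h1, h2],
          show pvPairStep (e, d) l = (e, l.drop 6) from by simp [pvPairStep, h1, h2]]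
        exact ih acc _ _ ht
      · rw [show pvBstep (acc, e, d, true) l = (acc, e, d, true) from by
            simp [pvBstep, h1, h2, hl],
          show pvPairStep (e, d) l = (e, d) from by simp [pvPairStep, h1, h2]]
        exact ih acc _ _ ht

theorem pv_run_fresh (ls : List (List Char)) (acc : List (List (String × String)))
    (h : ∀ l ∈ ls, l ≠ []) (hne : ls ≠ []) :
    ls.foldl pvBstep (acc, [], [], false)
      = (acc, (ls.foldl pvPairStep ([], [])).1, (ls.foldl pvPairStep ([], [])).2, true) := by
  cases ls with
  | nil => exact absurd rfl hne
  | cons l t =>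
    have hl : l ≠ [] := h l List.mem_cons_self
    have ht : ∀ x ∈ t, x ≠ [] := fun x hx => h x (List.mem_cons_of_mem _ hx)
    simp only [List.foldl_cons]
    by_cases h1 : PySem.Chars.startswith l pvEv
    · rw [show pvBstep (acc, [], [], false) l = (acc, l.drop 7, [], true) from by
          simp [pvBstep, h1],
        show pvPairStep ([], []) l = (l.drop 7, []) from by simp [pvPairStep, h1]]
      exact pv_run_started t acc _ _ ht
    · by_cases h2 : PySem.Chars.startswith l pvDa
      · rw [show pvBstep (acc, [], [], false) l = (acc, [], l.drop 6, true) from by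
            simp [pvBstep, h1, h2],
          show pvPairStep ([], []) l = ([], l.drop 6) from by simp [pvPairStep, h1, h2]]
        exact pv_run_started t acc _ _ ht
      · rw [show pvBstep (acc, [], [], false) l = (acc, [], [], true) from by
            simp [pvBstep, h1, h2, hl],
          show pvPairStep ([], []) l = ([], []) from by simp [pvPairStep, h1, h2]]
        exact pv_run_started t acc _ _ ht

theorem pv_chunk_run_core (c : List Char) (acc : List (List (String × String)))
    (h0 : c ≠ []) (h2 : c.getLast? ≠ some '\n') (hn : pvNoNN c = true) :
    (pvLines c).foldl pvBstep (acc, [], [], false)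
      = (acc, (pvChunkPair (pvStrip c)).1, (pvChunkPair (pvStrip c)).2, true) := by
  by_cases hh : c.head? = some '\n'
  · cases c with
    | nil => simp at hh
    | cons a c' =>
      simp only [List.head?_cons, Option.some.injEq] at hh
      subst hh
      cases c' with
      | nil => simp at h2
      | cons b c'' =>
        have h1' : (b :: c'').head? ≠ some '\n' := by
          intro hhh
          rw [pvNoNN, if_pos ⟨rfl, hhh⟩] at hn
          simp at hn
        have hn' : pvNoNN (b :: c'') = true := pv_noNN_tail _ _ hn
        have h2' : (b :: c'').getLast? ≠ some '\n' := by
          rw [List.getLast?_cons_cons] at h2; exact h2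
        have hstrip : pvStrip ('\n' :: b :: c'') = b :: c'' := by
          rw [pv_strip_cons]
          exact pv_strip_id _ h1' h2'
        rw [pvLines_cons_nl, hstrip]
        simp only [List.foldl_cons]
        rw [pvBstep_nil_idle]
        unfold pvChunkPair
        exact pv_run_fresh _ acc
          (pv_lines_all_ne_nil (b :: c'').length _ rfl (by simp) hn' h1' h2')
          (pv_lines_ne_nil _)
  · have hst : pvStrip c = c := pv_strip_id c hh h2
    rw [hst]
    unfold pvChunkPair
    exact pv_run_fresh _ acc
      (pv_lines_all_ne_nil c.length c rfl h0 hn hh h2) (pv_lines_ne_nil c)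

theorem pv_chunk_run (c : List Char) (acc : List (List (String × String)))
    (hn : pvNoNN c = true) :
    (pvLines c).foldl pvBstep (acc, [], [], false)
      = if c.getLast? = some '\n' ∨ c = [] then (acc ++ pvF c, [], [], false)
        else (acc, (pvChunkPair (pvStrip c)).1, (pvChunkPair (pvStrip c)).2, true) := by
  by_cases hc : c.getLast? = some '\n' ∨ c = []
  · rw [if_pos hc]
    rcases hc with hlast | h0
    · obtain ⟨c0, rfl⟩ := List.getLast?_eq_some_iff.mp hlast
      obtain ⟨hn0, hl0⟩ := pv_noNN_snoc c0 hn
      rw [pv_lines_snoc_nl, List.foldl_append]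
      by_cases hc0 : c0 = []
      · subst hc0
        show List.foldl pvBstep ((pvLines []).foldl pvBstep (acc, [], [], false)) [[]] = _
        show List.foldl pvBstep (List.foldl pvBstep (acc, [], [], false) [[]]) [[]] = _
        simp only [List.foldl_cons, List.foldl_nil]
        rw [pvBstep_nil_idle, pvBstep_nil_idle]
        have : pvF ([] ++ ['\n']) = [] := by
          unfold pvF
          rw [if_pos (by rfl)]
        rw [this]
        simp
      · rw [pv_chunk_run_core c0 acc hc0 hl0 hn0]
        simp only [List.foldl_cons, List.foldl_nil]
        rw [pvBstep_nil_flush]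
        have : pvF (c0 ++ ['\n'])
            = [pvFrame (pvChunkPair (pvStrip c0)).1 (pvChunkPair (pvStrip c0)).2] := by
          unfold pvF
          rw [pv_strip_snoc, if_neg (pv_strip_ne c0 hc0 hl0)]
        rw [this]
    · subst h0
      show List.foldl pvBstep (acc, [], [], false) [[]] = _
      simp only [List.foldl_cons, List.foldl_nil]
      rw [pvBstep_nil_idle]
      have : pvF [] = [] := by unfold pvF; rw [if_pos (by rfl)]
      rw [this]
      simp
  · rw [if_neg hc]
    push_neg at hc
    exact pv_chunk_run_core c acc hc.2 hc.1 hn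

theorem pv_fold_glue (cs : List (List Char)) : ∀ (acc : List (List (String × String))),
    cs ≠ [] → (∀ c ∈ cs, pvNoNN c = true) →
    pvBfin ((pvGlue cs).foldl pvBstep (acc, [], [], false)) = cs.foldl pvAstep acc := by
  induction cs with
  | nil => intro acc h _; exact absurd rfl h
  | cons c cs ih =>
    intro acc _ hall
    have hnc : pvNoNN c = true := hall c List.mem_cons_self
    cases cs with
    | nil =>
      show pvBfin ((pvLines c).foldl pvBstep (acc, [], [], false)) = _
      rw [pv_chunk_run c acc hnc]
      split
      · simp [pvBfin, pvAstep]
      · rename_i hcase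
        push_neg at hcase
        show (if true = true then _ else _) = _
        rw [if_pos rfl]
        show acc ++ [pvFrame (pvChunkPair (pvStrip c)).1 (pvChunkPair (pvStrip c)).2]
            = List.foldl pvAstep acc [c]
        simp only [List.foldl_cons, List.foldl_nil]
        unfold pvAstep pvF
        rw [if_neg (pv_strip_ne c hcase.2 hcase.1)]
    | cons c2 cs2 =>
      rw [pv_glue_cons_cons, List.foldl_append]
      rw [pv_chunk_run c acc hnc]
      have hrest : ∀ x ∈ c2 :: cs2, pvNoNN x = true :=
        fun x hx => hall x (List.mem_cons_of_mem _ hx)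
      split
      · simp only [List.foldl_cons]
        rw [pvBstep_nil_idle]
        rw [ih (acc ++ pvF c) (by simp) hrest]
        rfl
      · rename_i hcase
        push_neg at hcase
        simp only [List.foldl_cons]
        rw [pvBstep_nil_flush]
        have hf : acc ++ [pvFrame (pvChunkPair (pvStrip c)).1 (pvChunkPair (pvStrip c)).2]
            = pvAstep acc c := by
          unfold pvAstep pvF
          rw [if_neg (pv_strip_ne c hcase.2 hcase.1)]
        rw [hf, ih (pvAstep acc c) (by simp) hrest]
        rfl

-- ---- port bridges ----
theorem pv_ofList_empty_iff (l : List Char) : (String.ofList l = "") ↔ l = [] := by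
  constructor
  · intro h
    have := congrArg String.toList h
    simpa using this
  · rintro rfl; decide

theorem pv_sw_ev (l : List Char) :
    PySem.Str.startswith (String.ofList l) "event: " = PySem.Chars.startswith l pvEv := by
  simp [PySem.Str.startswith, pvEv]

theorem pv_sw_da (l : List Char) :
    PySem.Str.startswith (String.ofList l) "data: " = PySem.Chars.startswith l pvDa := by
  simp [PySem.Str.startswith, pvDa]

theorem pv_slice7 (l : List Char) :
    PySem.Str.slice (String.ofList l) (some 7) none = String.ofList (l.drop 7) := by
  rw [PySem.Str.slice]
  congr 1
  rw [show (String.ofList l).toList = l from by simp]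
  rw [PySem.Chars.slice_eq_listSlice, PySem.List.slice_from]
  · rfl
  · norm_num

theorem pv_slice6 (l : List Char) :
    PySem.Str.slice (String.ofList l) (some 6) none = String.ofList (l.drop 6) := by
  rw [PySem.Str.slice]
  congr 1
  rw [show (String.ofList l).toList = l from by simp]
  rw [PySem.Chars.slice_eq_listSlice, PySem.List.slice_from]
  · rfl
  · norm_num

theorem pv_split_n (s : String) :
    (PySem.Str.split? s "\n").getD [] = (pvLines s.toList).map String.ofList := by
  rw [PySem.Str.split?, PySem.Chars.split?]
  rw [show ("\n" : String).toList = ['\n'] from by decide]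
  rw [if_neg (by decide)]
  simp only [Option.map_some, Option.getD_some]
  rw [pv_splitOn_eq_spF, pv_spF_lines _ _ (by omega)]

theorem pv_split_nn (s : String) :
    (PySem.Str.split? s "\n\n").getD [] = (pvChunks s.toList).map String.ofList := by
  rw [PySem.Str.split?, PySem.Chars.split?]
  rw [show ("\n\n" : String).toList = ['\n', '\n'] from by decide]
  rw [if_neg (by decide)]
  simp only [Option.map_some, Option.getD_some]
  rw [pv_splitOn_eq_spF, pv_spF_chunks _ _ (by omega)]

theorem pv_dict_fold (ls : List (List Char)) : ∀ (e d : List Char),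
    (ls.foldl (fun fr l => pv_a_inner fr (String.ofList l))
      (PySem.Dict.mk [("event", String.ofList e), ("data", String.ofList d)])).items
      = pvFrame (ls.foldl pvPairStep (e, d)).1 (ls.foldl pvPairStep (e, d)).2 := by
  induction ls with
  | nil => intro e d; rfl
  | cons l t ih =>
    intro e d
    simp only [List.foldl_cons]
    by_cases h1 : PySem.Chars.startswith l pvEv
    · rw [show pv_a_inner (PySem.Dict.mk [("event", String.ofList e), ("data", String.ofList d)])
            (String.ofList l)
          = PySem.Dict.mk [("event", String.ofList (l.drop 7)), ("data", String.ofList d)] from by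
        unfold pv_a_inner
        rw [pv_sw_ev, pv_slice7, if_pos h1]
        simp [PySem.Dict.insert, PySem.Dict.contains]]
      rw [ih, show pvPairStep (e, d) l = (l.drop 7, d) from by simp [pvPairStep, h1]]
    · by_cases h2 : PySem.Chars.startswith l pvDa
      · rw [show pv_a_inner (PySem.Dict.mk [("event", String.ofList e), ("data", String.ofList d)])
              (String.ofList l)
            = PySem.Dict.mk [("event", String.ofList e), ("data", String.ofList (l.drop 6))] from by
          unfold pv_a_inner
          rw [pv_sw_ev, pv_sw_da, pv_slice6, if_neg h1, if_pos h2]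
          simp [PySem.Dict.insert, PySem.Dict.contains]]
        rw [ih, show pvPairStep (e, d) l = (e, l.drop 6) from by simp [pvPairStep, h1, h2]]
      · rw [show pv_a_inner (PySem.Dict.mk [("event", String.ofList e), ("data", String.ofList d)])
              (String.ofList l)
            = PySem.Dict.mk [("event", String.ofList e), ("data", String.ofList d)] from by
          unfold pv_a_inner
          rw [pv_sw_ev, pv_sw_da, if_neg h1, if_neg h2]]
        rw [ih, show pvPairStep (e, d) l = (e, d) from by simp [pvPairStep, h1, h2]]

theorem pv_a_step_eq (fr : List (List (String × String))) (c : List Char) :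
    pv_a_step fr (String.ofList c) = pvAstep fr c := by
  unfold pv_a_step
  have hraw : PySem.Str.stripChars (String.ofList c) "\n" = String.ofList (pvStrip c) := by
    rw [PySem.Str.stripChars]
    congr 1
    rw [show (String.ofList c).toList = c from by simp]
    rw [show ("\n" : String).toList = ['\n'] from by decide]
    rfl
  rw [hraw]
  by_cases hempty : pvStrip c = []
  · rw [if_pos (by rw [hempty])]
    unfold pvAstep pvF
    rw [if_pos hempty]
    simp
  · rw [if_neg (fun hcon => hempty ((pv_ofList_empty_iff _).mp hcon))]
    rw [pv_split_n]
    rw [show (String.ofList (pvStrip c)).toList = pvStrip c from by simp]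
    rw [List.foldl_map]
    rw [show ("" : String) = String.ofList [] from by decide]
    rw [pv_dict_fold]
    unfold pvAstep pvF
    rw [if_neg hempty]
    rfl

theorem pv_portA_char (body : String) :
    parse_sse_frames_py body = (pvChunks body.toList).foldl pvAstep [] := by
  unfold parse_sse_frames_py
  rw [pv_split_nn, List.foldl_map]
  congr 1
  funext fr c
  exact pv_a_step_eq fr c

theorem pv_b_fold (ls : List (List Char)) : ∀ (acc : List (List (String × String)))
    (e d : List Char) (st : Bool),
    (ls.map String.ofList).foldl pv_b_step (acc, String.ofList e, String.ofList d, st)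
      = ((ls.foldl pvBstep (acc, e, d, st)).1,
         String.ofList (ls.foldl pvBstep (acc, e, d, st)).2.1,
         String.ofList (ls.foldl pvBstep (acc, e, d, st)).2.2.1,
         (ls.foldl pvBstep (acc, e, d, st)).2.2.2) := by
  induction ls with
  | nil => intro acc e d st; rfl
  | cons l t ih =>
    intro acc e d st
    simp only [List.map_cons, List.foldl_cons]
    unfold pv_b_step
    rw [pv_sw_ev, pv_sw_da, pv_slice7, pv_slice6]
    by_cases h1 : PySem.Chars.startswith l pvEv
    · rw [if_pos h1,
        show pvBstep (acc, e, d, st) l = (acc, l.drop 7, d, true) from by simp [pvBstep, h1]]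
      exact ih acc (l.drop 7) d true
    · rw [if_neg h1]
      by_cases h2 : PySem.Chars.startswith l pvDa
      · rw [if_pos h2,
          show pvBstep (acc, e, d, st) l = (acc, e, l.drop 6, true) from by
            simp [pvBstep, h1, h2]]
        exact ih acc e (l.drop 6) true
      · rw [if_neg h2]
        by_cases hl : l = []
        · subst hl
          rw [if_pos (by decide)]
          cases st with
          | false =>
            rw [show pvBstep (acc, e, d, false) [] = (acc, e, d, false) from
              pvBstep_nil_idle acc e d]
            exact ih acc e d false
          | true =>
            rw [show pvBstep (acc, e, d, true) [] = (acc ++ [pvFrame e d], [], [], false) from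
              pvBstep_nil_flush acc e d]
            exact ih (acc ++ [pvFrame e d]) [] [] false
        · rw [if_neg (fun hcon => hl ((pv_ofList_empty_iff _).mp hcon)),
            show pvBstep (acc, e, d, st) l = (acc, e, d, true) from by
              simp [pvBstep, h1, h2, hl]]
          exact ih acc e d true

theorem pv_portB_char (body : String) :
    parse_sse_frames_py_alt body = pvBfin ((pvLines body.toList).foldl pvBstep ([], [], [], false)) := by
  unfold parse_sse_frames_py_alt
  rw [pv_split_n]
  rw [show ("" : String) = String.ofList [] from by decide]
  rw [pv_b_fold]
  unfold pv_b_finish pvBfin pvFrame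
  split
  · rfl
  · rfl

theorem pv_main (body : String) : parse_sse_frames_py body = parse_sse_frames_py_alt body := by
  rw [pv_portA_char, pv_portB_char, pv_lines_eq_glue]
  exact (pv_fold_glue _ _ (pv_chunks_ne_nil _) (pv_noNN_chunks _)).symm

-- ===== VERDICT (by name: the statement is the Claim_ definition above) =====
theorem parse_sse_frames_py_spec : Claim_equal_parse_sse_frames_py := by
  intro body _
  unfold Spec_parse_sse_frames_py
  exact pv_main body
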